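-- pv_equiv track=rewrite | github.com/LuisaFerro/Estrutura-da-Dados-UnB | Questionário 5/Ordenação e Busca Q1(meia noite).py | subtraiStrings
-- ===== SOURCE A (Python) =====
-- def subtraiStrings(atividades,planejamento):
--     restoAtividades = ''
--     for i in range(len(atividades)): #string enorme com todas as atividades
--         if atividades[i] in planejamento:
--             index = planejamento.index(atividades[i])
--             if index == 0:
--                 planejamento = planejamento[1:]
--             else:
--                 planejamento = planejamento[:index] + planejamento[index+1:]
--         else:
--             restoAtividades += atividades[i]
--
--     return restoAtividades, planejamento
-- ===== SOURCE B (Python) =====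
-- def subtraiStrings(atividades, planejamento):
--     # counts of each character still available in planejamento
--     need = {}
--     for c in planejamento:
--         need[c] = need.get(c, 0) + 1
--     # one pass over atividades: consume an available char or keep it as leftover
--     matched = {}
--     resto = []
--     for c in atividades:
--         if need.get(c, 0) > 0:
--             need[c] = need.get(c, 0) - 1
--             matched[c] = matched.get(c, 0) + 1
--         else:
--             resto.append(c)
--     # one pass over planejamento: skip the first matched[c] occurrences of each char
--     keep = []
--     for c in planejamento:
--         if matched.get(c, 0) > 0:
--             matched[c] = matched.get(c, 0) - 1
--         else:
--             keep.append(c)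
--     return ''.join(resto), ''.join(keep)
-- ===== Notes on version B (the rewrite author's own statement) =====
-- stated objective: faster
-- what changed: Replaced the per-character scan-and-slice of planejamento (substring search, index, string rebuilding on every match) by a counting dictionary built once plus one linear pass over each string that consumes available characters and then skips the first matched[c] occurrences of each character.
import Mathlib
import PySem

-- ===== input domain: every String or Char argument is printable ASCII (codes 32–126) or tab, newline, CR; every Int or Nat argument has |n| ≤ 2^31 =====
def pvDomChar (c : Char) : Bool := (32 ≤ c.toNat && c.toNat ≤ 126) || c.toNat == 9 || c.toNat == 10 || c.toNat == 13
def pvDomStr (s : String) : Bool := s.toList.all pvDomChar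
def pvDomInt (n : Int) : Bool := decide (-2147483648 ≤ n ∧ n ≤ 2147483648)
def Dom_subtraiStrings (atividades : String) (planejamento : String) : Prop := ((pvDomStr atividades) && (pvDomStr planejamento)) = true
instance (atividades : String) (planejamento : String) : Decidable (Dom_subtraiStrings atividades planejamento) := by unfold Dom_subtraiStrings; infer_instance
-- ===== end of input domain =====

-- B replaces A's per-character scan/slice of planejamento by a count dictionary and one linear
-- pass over each string (objective: faster; same return value, no side effects in either version).


-- ===== PORT A =====
-- A's 'for i in range(len(atividades))' reads atividades[i] in index order; it is ported as the
-- structural recursion over the character list carrying the same (restoAtividades, planejamento)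
-- state.  'atividades[i] in planejamento' for a one-character needle is character membership;
-- 'planejamento.index(...)' is PySem.List.index? (the .getD 0 is never used: the call is guarded
-- by the membership test, exactly as in A); the slices are PySem.List.slice.
def subtraiStringsGo : List Char → List Char × List Char → List Char × List Char
  | [], st => st
  | c :: rest, (resto, p) =>
    if c ∈ p then
      let idx : Int := ((PySem.List.index? p c).getD 0 : Nat)
      if idx = 0 then
        subtraiStringsGo rest (resto, PySem.List.slice p (some 1) none)
      else
        subtraiStringsGo rest (resto, PySem.List.slice p none (some idx) ++ PySem.List.slice p (some (idx + 1)) none)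
    else
      subtraiStringsGo rest (resto ++ [c], p)

def subtraiStrings (atividades : String) (planejamento : String) : String × String :=
  let r := subtraiStringsGo atividades.toList ([], planejamento.toList)
  (String.ofList r.1, String.ofList r.2)

-- ===== PORT B =====
-- Source B's second loop: consume an available character (decrement need, increment matched) or keep it.
def altStep1 (st : List Char × PySem.Dict Char Int × PySem.Dict Char Int) (c : Char) :
    List Char × PySem.Dict Char Int × PySem.Dict Char Int :=
  if st.2.1.getD c 0 > 0 then
    (st.1, st.2.1.insert c (st.2.1.getD c 0 - 1), st.2.2.insert c (st.2.2.getD c 0 + 1))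
  else
    (st.1 ++ [c], st.2.1, st.2.2)

-- Source B's third loop: skip the first matched[c] occurrences of each character of planejamento.
def altStep2 (st : List Char × PySem.Dict Char Int) (c : Char) : List Char × PySem.Dict Char Int :=
  if st.2.getD c 0 > 0 then (st.1, st.2.insert c (st.2.getD c 0 - 1)) else (st.1 ++ [c], st.2)

def subtraiStrings_alt (atividades : String) (planejamento : String) : String × String :=
  let need : PySem.Dict Char Int :=
    planejamento.toList.foldl (fun d c => d.insert c (d.getD c 0 + 1)) PySem.Dict.empty
  let r1 := atividades.toList.foldl altStep1 ([], need, PySem.Dict.empty)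
  let keep := (planejamento.toList.foldl altStep2 ([], r1.2.2)).1
  (String.ofList r1.1, String.ofList keep)

-- ===== PRECONDITION & SPEC =====
def Spec_subtraiStrings (atividades : String) (planejamento : String) (out : String × String) : Prop := out = subtraiStrings_alt atividades planejamento
instance (atividades : String) (planejamento : String) (out : String × String) : Decidable (Spec_subtraiStrings atividades planejamento out) := by unfold Spec_subtraiStrings; infer_instance

-- ===== CLAIM (what is proved, stated in full; the proofs are below) =====
def Claim_equal_subtraiStrings : Prop := ∀ (atividades : String) (planejamento : String), Dom_subtraiStrings atividades planejamento → Spec_subtraiStrings atividades planejamento (subtraiStrings atividades planejamento)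

-- ===== LEMMAS AND PROOFS =====

-- proof-side model: 'skipF m p' drops, for every character c, the first (m c) occurrences of c
def skipF : (Char → Nat) → List Char → List Char
  | _, [] => []
  | m, x :: xs => if 0 < m x then skipF (Function.update m x (m x - 1)) xs else x :: skipF m xs

-- proof-side model of B's middle pass: leftovers plus how many occurrences were consumed
def fp1 (p : List Char) : List Char → List Char → (Char → Nat) → List Char × (Char → Nat)
  | [], resto, m => (resto, m)
  | c :: rest, resto, m =>
    if m c < List.count c p then fp1 p rest resto (Function.update m c (m c + 1))
    else fp1 p rest (resto ++ [c]) m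

lemma skipF_zero (p : List Char) : skipF (fun _ => 0) p = p := by
  induction p with
  | nil => rfl
  | cons x xs ih => simp [skipF, ih]

lemma mem_skipF (m : Char → Nat) (p : List Char) (c : Char) :
    c ∈ skipF m p ↔ m c < List.count c p := by
  induction p generalizing m with
  | nil => simp [skipF]
  | cons x xs ih =>
    by_cases hx : 0 < m x
    · rw [skipF, if_pos hx, ih]
      by_cases hxc : c = x
      · subst hxc; simp only [Function.update_self, List.count_cons_self]; omega
      · simp [Function.update_of_ne hxc, Ne.symm hxc]
    · rw [skipF, if_neg hx]
      by_cases hxc : c = x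
      · subst hxc; simp [List.count_cons_self]; omega
      · simp [hxc, Ne.symm hxc, ih]

lemma erase_skipF (m : Char → Nat) (p : List Char) (c : Char) (h : m c < List.count c p) :
    (skipF m p).erase c = skipF (Function.update m c (m c + 1)) p := by
  induction p generalizing m with
  | nil => simp [List.count_nil] at h
  | cons x xs ih =>
    by_cases hx : 0 < m x
    · rw [skipF, if_pos hx]
      have hx' : 0 < Function.update m c (m c + 1) x := by
        by_cases hxc : x = c
        · subst hxc; simp [Function.update_self]
        · simpa [Function.update_of_ne hxc] using hx
      rw [skipF, if_pos hx']
      by_cases hxc : x = c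
      · subst hxc
        have h' : Function.update m x (m x - 1) x < List.count x xs := by
          simp only [Function.update_self]
          have hcc : List.count x (x :: xs) = List.count x xs + 1 := by simp
          omega
        rw [ih _ h']
        congr 1
        funext y
        by_cases hy : y = x
        · subst hy; simp only [Function.update_self]; omega
        · simp [Function.update_of_ne hy]
      · have h' : Function.update m x (m x - 1) c < List.count c xs := by
          rw [Function.update_of_ne (Ne.symm hxc)]
          have hcc : List.count c (x :: xs) = List.count c xs := by simp [hxc]
          omega
        rw [ih _ h']
        congr 1
        funext y
        by_cases hyx : y = x
        · subst hyx; simp [Function.update_of_ne hxc, Function.update_self]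
        · by_cases hyc : y = c
          · subst hyc; simp [Function.update_of_ne hyx, Function.update_self]
          · simp [Function.update_of_ne hyx, Function.update_of_ne hyc]
    · rw [skipF, if_neg hx]
      by_cases hxc : x = c
      · subst hxc
        rw [List.erase_cons_head]
        have hx' : 0 < Function.update m x (m x + 1) x := by simp [Function.update_self]
        rw [skipF, if_pos hx']
        congr 1
        funext y
        by_cases hy : y = x
        · subst hy; simp [Function.update_self]
        · simp [Function.update_of_ne hy]
      · rw [List.erase_cons_tail (by simp [hxc])]
        have hx' : ¬ 0 < Function.update m c (m c + 1) x := by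
          rwa [Function.update_of_ne hxc]
        rw [skipF, if_neg hx']
        have h' : m c < List.count c xs := by
          have hcc : List.count c (x :: xs) = List.count c xs := by simp [hxc]
          omega
        rw [ih _ h']

-- A's slice/index branch, when the character is present, erases its first occurrence
lemma goA_cons (c : Char) (rest resto p : List Char) :
    subtraiStringsGo (c :: rest) (resto, p) =
      if c ∈ p then subtraiStringsGo rest (resto, p.erase c)
      else subtraiStringsGo rest (resto ++ [c], p) := by
  by_cases hc : c ∈ p
  · obtain ⟨k, hk⟩ := Option.isSome_iff_exists.mp ((PySem.List.index?_isSome_iff p c).mpr hc)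
    obtain ⟨pre, suf, hps, hlen, hpre⟩ := (PySem.List.index?_eq_some_iff p c k).mp hk
    rw [subtraiStringsGo, if_pos hc, hk]
    simp only [Option.getD_some]
    have herase : p.erase c = pre ++ suf := by
      rw [hps, List.erase_append_right _ (by simpa using hpre), List.erase_cons_head]
    by_cases h0 : k = 0
    · subst h0
      have hpe : pre = [] := List.eq_nil_of_length_eq_zero hlen
      subst hpe
      rw [if_pos (by norm_num), if_pos hc]
      congr 1
      simp only [Prod.mk.injEq, true_and]
      refine (PySem.List.slice_from p (by norm_num)).trans ?_
      rw [herase, hps]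
      rfl
    · rw [if_neg (by exact_mod_cast h0), if_pos hc]
      congr 1
      simp only [Prod.mk.injEq, true_and]
      have h1 : PySem.List.slice p none (some (k : Int)) = pre :=
        (PySem.List.slice_to_natCast p k).trans (by rw [hps, ← hlen]; exact List.take_left)
      have h2 : PySem.List.slice p (some ((k : Int) + 1)) none = suf := by
        have e : ((k : Int) + 1) = ((k + 1 : Nat) : Int) := by push_cast; ring
        rw [e]
        refine (PySem.List.slice_from_natCast p (k + 1)).trans ?_
        rw [hps, ← hlen]
        rw [show pre ++ c :: suf = (pre ++ [c]) ++ suf by simp,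
            show pre.length + 1 = (pre ++ [c]).length by simp]
        exact List.drop_left
      rw [h1, h2, herase]
  · rw [subtraiStringsGo, if_neg hc, if_neg hc]

-- A's whole loop, run on skipF m p, is B's middle pass followed by skipping the matched counts
lemma goA_eq_fp1 (p : List Char) (as : List Char) :
    ∀ (m : Char → Nat) (resto : List Char),
      subtraiStringsGo as (resto, skipF m p) =
        ((fp1 p as resto m).1, skipF (fp1 p as resto m).2 p) := by
  induction as with
  | nil => intro m resto; rfl
  | cons c rest ih =>
    intro m resto
    rw [goA_cons]
    by_cases h : m c < List.count c p
    · rw [if_pos ((mem_skipF m p c).mpr h), erase_skipF m p c h, ih]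
      rw [fp1, if_pos h]
    · rw [if_neg (fun hmem => h ((mem_skipF m p c).mp hmem)), ih]
      rw [fp1, if_neg h]

-- B's first loop builds the character counter of planejamento
lemma need_getD (p : List Char) (c : Char) :
    ((p.foldl (fun d c => d.insert c (d.getD c 0 + 1)) PySem.Dict.empty : PySem.Dict Char Int)).getD c 0 =
      (List.count c p : Int) := by
  have h := PySem.Dict.foldl_insert_getD_add_one_eq_counter (κ := Char) p
  exact (congrArg (fun d => PySem.Dict.getD d c 0) h).trans (PySem.Dict.getD_counter p c)

-- B's second loop agrees with the functional model fp1
lemma pass1_dict (p : List Char) (as : List Char) :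
    ∀ (resto : List Char) (need matched : PySem.Dict Char Int) (m : Char → Nat),
      (∀ c, need.getD c 0 = (List.count c p : Int) - (m c : Int)) →
      (∀ c, matched.getD c 0 = (m c : Int)) →
      (as.foldl altStep1 (resto, need, matched)).1 = (fp1 p as resto m).1 ∧
      ∀ c, (as.foldl altStep1 (resto, need, matched)).2.2.getD c 0 = ((fp1 p as resto m).2 c : Int) := by
  induction as with
  | nil =>
    intro resto need matched m _ hmat
    exact ⟨rfl, hmat⟩
  | cons c rest ih =>
    intro resto need matched m hneed hmat
    rw [List.foldl_cons]
    by_cases h : m c < List.count c p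
    · have hcond : need.getD c 0 > 0 := by rw [hneed c]; omega
      rw [fp1, if_pos h]
      have step : altStep1 (resto, need, matched) c =
          (resto, need.insert c (need.getD c 0 - 1), matched.insert c (matched.getD c 0 + 1)) := by
        rw [altStep1, if_pos hcond]
      rw [step]
      refine ih resto _ _ (Function.update m c (m c + 1)) ?_ ?_
      · intro y
        by_cases hy : y = c
        · subst hy
          rw [PySem.Dict.getD_insert_self, hneed y, Function.update_self]
          push_cast; ring
        · rw [PySem.Dict.getD_insert_of_ne _ _ _ hy, hneed y, Function.update_of_ne hy]
      · intro y
        by_cases hy : y = c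
        · subst hy
          rw [PySem.Dict.getD_insert_self, hmat y, Function.update_self]
          push_cast; ring
        · rw [PySem.Dict.getD_insert_of_ne _ _ _ hy, hmat y, Function.update_of_ne hy]
    · have hcond : ¬ need.getD c 0 > 0 := by rw [hneed c]; omega
      rw [fp1, if_neg h]
      have step : altStep1 (resto, need, matched) c = (resto ++ [c], need, matched) := by
        rw [altStep1, if_neg hcond]
      rw [step]
      exact ih (resto ++ [c]) need matched m hneed hmat

-- B's third loop computes skipF of the matched counts
lemma pass2_dict (q : List Char) :
    ∀ (keep : List Char) (matched : PySem.Dict Char Int) (m : Char → Nat),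
      (∀ c, matched.getD c 0 = (m c : Int)) →
      (q.foldl altStep2 (keep, matched)).1 = keep ++ skipF m q := by
  induction q with
  | nil => intro keep matched m _; simp [skipF]
  | cons c rest ih =>
    intro keep matched m hmat
    rw [List.foldl_cons]
    by_cases h : 0 < m c
    · have hcond : matched.getD c 0 > 0 := by rw [hmat c]; exact_mod_cast h
      have step : altStep2 (keep, matched) c = (keep, matched.insert c (matched.getD c 0 - 1)) := by
        rw [altStep2, if_pos hcond]
      rw [step, skipF, if_pos h]
      refine ih keep _ (Function.update m c (m c - 1)) ?_
      intro y
      by_cases hy : y = c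
      · subst hy
        rw [PySem.Dict.getD_insert_self, hmat y, Function.update_self]
        omega
      · rw [PySem.Dict.getD_insert_of_ne _ _ _ hy, hmat y, Function.update_of_ne hy]
    · have hcond : ¬ matched.getD c 0 > 0 := by rw [hmat c]; omega
      have step : altStep2 (keep, matched) c = (keep ++ [c], matched) := by
        rw [altStep2, if_neg hcond]
      rw [step, skipF, if_neg h, ih (keep ++ [c]) matched m hmat]
      simp

-- ===== VERDICT (by name: the statement is the Claim_ definition above) =====
theorem subtraiStrings_spec : Claim_equal_subtraiStrings := by
  intro a p _
  unfold Spec_subtraiStrings subtraiStrings subtraiStrings_alt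
  obtain ⟨hresto, hmat⟩ := pass1_dict p.toList a.toList []
    (p.toList.foldl (fun d c => d.insert c (d.getD c 0 + 1)) PySem.Dict.empty)
    PySem.Dict.empty (fun _ => 0)
    (fun c => by rw [need_getD]; simp)
    (fun c => by simp [pysem])
  have hA := goA_eq_fp1 p.toList a.toList (fun _ => 0) []
  rw [skipF_zero] at hA
  have hkeep := pass2_dict p.toList []
    ((a.toList.foldl altStep1 ([], (p.toList.foldl (fun d c => d.insert c (d.getD c 0 + 1)) PySem.Dict.empty), PySem.Dict.empty)).2.2)
    (fp1 p.toList a.toList [] (fun _ => 0)).2 hmat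
  simp only [hA, hresto, hkeep, List.nil_append]
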